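-- pv_equiv track=rewrite | github.com/SalehDinparvar/sequence_computer | A188429.py | are_sets_equal
-- ===== SOURCE A (Python) =====
-- def are_sets_equal(set_a, set_b):  # returns True if both given sets are equal
--     for i in set_a:
--         if i not in set_b:
--             return False
--     for i in set_b:
--         if i not in set_a:
--             return False
--     return True
-- ===== SOURCE B (Python) =====
-- def are_sets_equal(set_a, set_b):  # returns True if both given sets are equal
--     return set(set_a) == set(set_b)
-- ===== Notes on version B (the rewrite author's own statement) =====
-- stated objective: simpler
-- what changed: Replaces the two explicit mutual-membership loops with a single closed-form comparison set(set_a) == set(set_b).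
import Mathlib
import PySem

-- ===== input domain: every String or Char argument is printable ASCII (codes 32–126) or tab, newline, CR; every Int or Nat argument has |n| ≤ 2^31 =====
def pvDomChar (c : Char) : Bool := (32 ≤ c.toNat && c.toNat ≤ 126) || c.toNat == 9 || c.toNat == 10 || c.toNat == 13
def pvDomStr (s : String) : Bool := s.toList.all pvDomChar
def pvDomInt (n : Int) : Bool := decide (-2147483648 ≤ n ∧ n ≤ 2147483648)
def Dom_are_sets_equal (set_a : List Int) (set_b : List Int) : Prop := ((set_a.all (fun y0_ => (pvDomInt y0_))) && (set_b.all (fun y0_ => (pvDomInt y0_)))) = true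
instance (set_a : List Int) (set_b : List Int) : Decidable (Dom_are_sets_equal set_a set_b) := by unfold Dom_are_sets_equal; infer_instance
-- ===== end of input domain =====

-- B replaces A's two mutual-membership loops with the single closed-form comparison set(set_a) == set(set_b) (simpler).


-- ===== PORT A =====
-- loop 'for i in set_a: if i not in set_b: return False' as structural recursion
def pvLoopNotIn (xs ys : List Int) : Bool :=
  match xs with
  | [] => true
  | i :: rest => if !ys.contains i then false else pvLoopNotIn rest ys

def are_sets_equal (set_a : List Int) (set_b : List Int) : Bool :=
  if pvLoopNotIn set_a set_b = false then false
  else if pvLoopNotIn set_b set_a = false then false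
  else true

-- ===== PORT B =====
def are_sets_equal_alt (set_a : List Int) (set_b : List Int) : Bool :=
  PySem.Set.equal (PySem.Set.ofList set_a) (PySem.Set.ofList set_b)

-- ===== PRECONDITION & SPEC =====
def Spec_are_sets_equal (set_a : List Int) (set_b : List Int) (out : Bool) : Prop := out = are_sets_equal_alt set_a set_b
instance (set_a : List Int) (set_b : List Int) (out : Bool) : Decidable (Spec_are_sets_equal set_a set_b out) := by unfold Spec_are_sets_equal; infer_instance

-- ===== CLAIM (what is proved, stated in full; the proofs are below) =====
def Claim_equal_are_sets_equal : Prop := ∀ (set_a : List Int) (set_b : List Int), Dom_are_sets_equal set_a set_b → Spec_are_sets_equal set_a set_b (are_sets_equal set_a set_b)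

-- ===== LEMMAS AND PROOFS =====

-- ===== VERDICT (by name: the statement is the Claim_ definition above) =====
theorem pvLoopNotIn_iff (xs ys : List Int) :
    pvLoopNotIn xs ys = true ↔ ∀ x ∈ xs, x ∈ ys := by
  induction xs with
  | nil => simp [pvLoopNotIn]
  | cons i rest ih =>
      by_cases h : ys.contains i = true
      · simp [pvLoopNotIn, h, ih, List.contains_iff_mem.mp h]
      · have hm : i ∉ ys := fun hmem => h (List.contains_iff_mem.mpr hmem)
        simp [pvLoopNotIn, h, hm]

-- ===== VERDICT (by name: the statement is the Claim_ definition above) =====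
theorem are_sets_equal_spec : Claim_equal_are_sets_equal := by
  intro a b _
  unfold Spec_are_sets_equal are_sets_equal are_sets_equal_alt
  have hiff : (pvLoopNotIn a b = true ∧ pvLoopNotIn b a = true) ↔
      PySem.Set.equal (PySem.Set.ofList a) (PySem.Set.ofList b) = true := by
    rw [pvLoopNotIn_iff, pvLoopNotIn_iff, PySem.Set.equal_iff]
    simp only [PySem.Set.mem_ofList]
    constructor
    · rintro ⟨h1, h2⟩ x; exact ⟨fun hx => h1 x hx, fun hx => h2 x hx⟩
    · intro h; exact ⟨fun x hx => (h x).mp hx, fun x hx => (h x).mpr hx⟩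
  by_cases hab : pvLoopNotIn a b = true <;> by_cases hba : pvLoopNotIn b a = true
  · simp [hab, hba, hiff.mp ⟨hab, hba⟩]
  all_goals
    have hne : PySem.Set.equal (PySem.Set.ofList a) (PySem.Set.ofList b) = false := by
      rcases Bool.eq_false_or_eq_true
          (PySem.Set.equal (PySem.Set.ofList a) (PySem.Set.ofList b)) with he | he
      · obtain ⟨h1, h2⟩ := hiff.mpr he; simp_all
      · exact he
    simp [hab, hba, hne]
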